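-- pv_equiv track=rewrite | github.com/pomtom44/GlanceRF | glancerf/modules/map/aprs_client.py | _parse_tnc2
-- ===== SOURCE A (Python) =====
-- def _parse_tnc2(line: str) -> tuple[str, list[str], str] | None:
--     """Parse TNC2 line: SRCCALL>DST,PATH1,PATH2:body. Returns (srccall, path_calls, body) or None."""
--     idx = line.find(":")
--     if idx < 0:
--         return None
--     head = line[:idx]
--     body = line[idx + 1 :].strip()
--     gt = head.find(">")
--     if gt < 0:
--         return None
--     srccall = head[:gt].strip()
--     path_part = head[gt + 1 :].strip()
--     path_calls = [p.strip().rstrip("*") for p in path_part.split(",") if p.strip()]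
--     return (srccall, path_calls, body)
-- ===== SOURCE B (Python) =====
-- def _parse_tnc2(line: str) -> tuple[str, list[str], str] | None:
--     """Parse TNC2 line in a single left-to-right pass: collect source call,
--     path segment and body with a small state machine instead of find/slice."""
--     src = []
--     path = []
--     body = []
--     mode = 0  # 0 = source call, 1 = path, 2 = body
--     for ch in line:
--         if mode == 2:
--             body.append(ch)
--         elif ch == ":":
--             if mode == 0:
--                 return None  # no '>' before the first ':'
--             mode = 2
--         elif mode == 0 and ch == ">":
--             mode = 1
--         elif mode == 0:
--             src.append(ch)
--         else:
--             path.append(ch)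
--     if mode != 2:
--         return None  # no ':' at all
--     srccall = "".join(src).strip()
--     path_part = "".join(path).strip()
--     path_calls = [p.strip().rstrip("*") for p in path_part.split(",") if p.strip()]
--     return (srccall, path_calls, "".join(body).strip())
-- ===== Notes on version B (the rewrite author's own statement) =====
-- stated objective: alternative
-- what changed: Replaces A's two-stage find/slice parsing (find first ':', slice head/body, find '>' inside the head, slice again) with a single left-to-right state-machine pass that accumulates the source, path and body segments in one traversal; the per-token post-processing of the path is unchanged.
import Mathlib
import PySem

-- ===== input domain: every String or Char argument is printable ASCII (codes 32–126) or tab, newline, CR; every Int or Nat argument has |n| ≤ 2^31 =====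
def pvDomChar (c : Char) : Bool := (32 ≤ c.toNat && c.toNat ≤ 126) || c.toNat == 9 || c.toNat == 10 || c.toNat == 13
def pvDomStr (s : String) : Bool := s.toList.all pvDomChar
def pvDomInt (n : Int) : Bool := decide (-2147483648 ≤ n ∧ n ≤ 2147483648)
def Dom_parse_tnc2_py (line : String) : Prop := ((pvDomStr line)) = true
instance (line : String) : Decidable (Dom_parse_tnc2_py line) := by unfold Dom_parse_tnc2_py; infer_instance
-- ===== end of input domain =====

-- B replaces A's two-stage find/slice parsing with a single left-to-right
-- state-machine pass over the characters (alternative decomposition, same cost).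


-- shared helper: exact port of str.rstrip("*") (drop trailing '*' characters)
def pvRstripStar (s : List Char) : List Char := (s.reverse.dropWhile (· == '*')).reverse

-- shared helper: the path comprehension both Pythons contain verbatim:
-- [p.strip().rstrip("*") for p in path_part.split(",") if p.strip()]
def pvPathCalls (path_part : List Char) : List String :=
  (PySem.Chars.splitOn path_part [',']).foldl
    (fun acc p =>
      if PySem.Chars.strip p ≠ [] then acc ++ [String.ofList (pvRstripStar (PySem.Chars.strip p))]
      else acc) []

-- ===== PORT A =====
def parse_tnc2_py (line : String) : Option (String × List String × String) :=
  let l := line.toList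
  let idx := PySem.Chars.find l [':']
  if idx < 0 then none
  else
    let head := PySem.List.slice l none (some idx)
    let body := PySem.Chars.strip (PySem.List.slice l (some (idx + 1)) none)
    let gt := PySem.Chars.find head ['>']
    if gt < 0 then none
    else
      let srccall := PySem.Chars.strip (PySem.List.slice head none (some gt))
      let path_part := PySem.Chars.strip (PySem.List.slice head (some (gt + 1)) none)
      some (String.ofList srccall, pvPathCalls path_part, String.ofList body)

-- ===== PORT B =====
-- the loop in mode 2: body.append(ch) for every remaining character
def pvGoBody (body : List Char) : List Char → List Char
  | [] => body
  | c :: rest => pvGoBody (body ++ [c]) rest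

-- the loop in mode 1: accumulate path until ':' flips to mode 2
def pvGoPath (src path : List Char) : List Char → Option (List Char × List Char × List Char)
  | [] => none
  | c :: rest => if c = ':' then some (src, path, pvGoBody [] rest) else pvGoPath src (path ++ [c]) rest

-- the loop in mode 0: accumulate src; ':' aborts, '>' flips to mode 1
def pvGoSrc (src : List Char) : List Char → Option (List Char × List Char × List Char)
  | [] => none
  | c :: rest =>
      if c = ':' then none
      else if c = '>' then pvGoPath src [] rest
      else pvGoSrc (src ++ [c]) rest

def parse_tnc2_py_alt (line : String) : Option (String × List String × String) :=
  match pvGoSrc [] line.toList with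
  | none => none
  | some (src, path, body) =>
      some (String.ofList (PySem.Chars.strip src),
            pvPathCalls (PySem.Chars.strip path),
            String.ofList (PySem.Chars.strip body))

-- ===== PRECONDITION & SPEC =====
def Spec_parse_tnc2_py (line : String) (out : Option (String × List String × String)) : Prop := out = parse_tnc2_py_alt line
instance (line : String) (out : Option (String × List String × String)) : Decidable (Spec_parse_tnc2_py line out) := by unfold Spec_parse_tnc2_py; infer_instance

-- ===== CLAIM (what is proved, stated in full; the proofs are below) =====
def Claim_equal_parse_tnc2_py : Prop := ∀ (line : String), Dom_parse_tnc2_py line → Spec_parse_tnc2_py line (parse_tnc2_py line)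

-- ===== LEMMAS AND PROOFS =====

lemma pvGoBody_eq (body l : List Char) : pvGoBody body l = body ++ l := by
  induction l generalizing body with
  | nil => simp [pvGoBody]
  | cons c rest ih => simp [pvGoBody, ih]

lemma pvGoPath_none (src path l : List Char) (h : ':' ∉ l) : pvGoPath src path l = none := by
  induction l generalizing path with
  | nil => rfl
  | cons c rest ih =>
      simp only [List.mem_cons, not_or] at h
      simp [pvGoPath, Ne.symm h.1, ih _ h.2]

lemma pvGoPath_append (src path b rest : List Char) (h : ':' ∉ b) :
    pvGoPath src path (b ++ rest) = pvGoPath src (path ++ b) rest := by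
  induction b generalizing path with
  | nil => simp
  | cons c b' ih =>
      simp only [List.mem_cons, not_or] at h
      simp [pvGoPath, Ne.symm h.1, ih _ h.2, List.append_assoc]

lemma pvGoSrc_none (src l : List Char) (h : ':' ∉ l) : pvGoSrc src l = none := by
  induction l generalizing src with
  | nil => rfl
  | cons c rest ih =>
      simp only [List.mem_cons, not_or] at h
      by_cases hc : c = '>'
      · simp [pvGoSrc, hc, pvGoPath_none _ _ _ h.2]
      · simp [pvGoSrc, Ne.symm h.1, hc, ih _ h.2]

lemma pvGoSrc_append (src a rest : List Char) (h : ∀ c ∈ a, c ≠ ':' ∧ c ≠ '>') :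
    pvGoSrc src (a ++ rest) = pvGoSrc (src ++ a) rest := by
  induction a generalizing src with
  | nil => simp
  | cons c a' ih =>
      have hc := h c (by simp)
      simp [pvGoSrc, hc.1, hc.2, ih _ (fun x hx => h x (by simp [hx])), List.append_assoc]

-- find of a single absent character is -1
lemma pvFind_single_not_mem (l : List Char) (c : Char) (h : c ∉ l) :
    PySem.Chars.find l [c] = -1 := by
  rw [PySem.Chars.find_eq_neg_one_iff]
  intro hinf
  exact h (hinf.sublist.subset (by simp))

-- find of a single character points at its first occurrence
lemma pvFind_single_append (tw u : List Char) (c : Char) (h : c ∉ tw) :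
    PySem.Chars.find (tw ++ c :: u) [c] = (tw.length : Int) := by
  set l := tw ++ c :: u with hl
  have hmem : [c] <:+: l := ⟨tw, u, by rw [hl]; simp⟩
  have hpos : 0 ≤ PySem.Chars.find l [c] := (PySem.Chars.find_nonneg_iff _ _).mpr hmem
  obtain ⟨hpre, hmin⟩ := PySem.Chars.find_spec (s := l) (sub := [c]) hpos
  set n := (PySem.Chars.find l [c]).toNat with hn
  have hat : [c] <+: l.drop tw.length := by
    rw [hl, List.drop_left]
    exact ⟨u, rfl⟩
  have hlen : n = tw.length := by
    rcases lt_trichotomy n tw.length with hlt | heq | hgt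
    · exfalso
      obtain ⟨t, ht⟩ := hpre
      have hdrop : l.drop n = c :: t := by simpa using ht.symm
      have : l[n]? = some c := by
        have h0 : (l.drop n)[0]? = some c := by simp [hdrop]
        rwa [List.getElem?_drop, Nat.add_zero] at h0
      have : c ∈ tw := by
        rw [hl] at this
        rw [List.getElem?_append_left (by omega)] at this
        exact List.mem_of_getElem? this
      exact h this
    · exact heq
    · exact absurd hat (hmin tw.length hgt)
  omega

-- decompose a list at the first occurrence of a character
lemma pvFirstSplit (l : List Char) (c : Char) (h : c ∈ l) :
    ∃ tw u, l = tw ++ c :: u ∧ c ∉ tw := by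
  induction l with
  | nil => cases h
  | cons d rest ih =>
      by_cases hdc : d = c
      · exact ⟨[], rest, by simp [hdc], by simp⟩
      · obtain ⟨tw, u, h1, h2⟩ := ih ((List.mem_cons.mp h).resolve_left (fun hc => hdc hc.symm))
        exact ⟨d :: tw, u, by simp [h1], by simp [Ne.symm hdc, h2]⟩

-- ===== VERDICT (by name: the statement is the Claim_ definition above) =====
theorem parse_tnc2_py_spec : Claim_equal_parse_tnc2_py := by
  intro line _
  unfold Spec_parse_tnc2_py
  simp only [parse_tnc2_py, parse_tnc2_py_alt]
  set l := line.toList with hl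
  by_cases hcolon : ':' ∈ l
  · obtain ⟨tw, u, hsplit, hnotin⟩ := pvFirstSplit l ':' hcolon
    rw [hsplit, pvFind_single_append tw u ':' hnotin]
    simp only [show ¬((tw.length : Int) < 0) by omega, if_false]
    have hslice_head : PySem.List.slice (tw ++ ':' :: u) none (some (tw.length : Int)) = tw := by
      rw [PySem.List.slice_to_natCast, List.take_left]
    have hslice_body : PySem.List.slice (tw ++ ':' :: u) (some ((tw.length : Int) + 1)) none
        = u := by
      have : (tw.length : Int) + 1 = ((tw.length + 1 : Nat) : Int) := by push_cast; ring
      rw [this, PySem.List.slice_from_natCast]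
      rw [show tw ++ ':' :: u = (tw ++ [':']) ++ u by simp]
      rw [show tw.length + 1 = (tw ++ [':']).length by simp]
      exact List.drop_left
    rw [hslice_head, hslice_body]
    by_cases hgt : '>' ∈ tw
    · obtain ⟨a, b, hsplit2, hnotin2⟩ := pvFirstSplit tw '>' hgt
      rw [hsplit2, pvFind_single_append a b '>' hnotin2]
      simp only [show ¬((a.length : Int) < 0) by omega, if_false]
      have hsrc : PySem.List.slice (a ++ '>' :: b) none (some (a.length : Int)) = a := by
        rw [PySem.List.slice_to_natCast, List.take_left]
      have hpath : PySem.List.slice (a ++ '>' :: b) (some ((a.length : Int) + 1)) none = b := by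
        have : (a.length : Int) + 1 = ((a.length + 1 : Nat) : Int) := by push_cast; ring
        rw [this, PySem.List.slice_from_natCast]
        rw [show a ++ '>' :: b = (a ++ ['>']) ++ b by simp]
        rw [show a.length + 1 = (a ++ ['>']).length by simp]
        exact List.drop_left
      rw [hsrc, hpath]
      -- B side
      have ha : ∀ x ∈ a, x ≠ ':' ∧ x ≠ '>' := by
        intro x hx
        constructor
        · intro hxc; apply hnotin; rw [hsplit2]; exact List.mem_append_left _ (hxc ▸ hx)
        · intro hxg; exact hnotin2 (hxg ▸ hx)
      have hb : ':' ∉ b := by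
        intro hbc; apply hnotin; rw [hsplit2]
        exact List.mem_append_right _ (List.mem_cons_of_mem _ hbc)
      have hB : pvGoSrc [] ((a ++ '>' :: b) ++ ':' :: u) = some (a, b, pvGoBody [] u) := by
        rw [show (a ++ '>' :: b) ++ ':' :: u = a ++ '>' :: (b ++ ':' :: u) by simp]
        rw [pvGoSrc_append [] a ('>' :: (b ++ ':' :: u)) ha]
        simp only [List.nil_append, pvGoSrc, reduceIte]
        rw [pvGoPath_append _ _ _ _ hb]
        simp [pvGoPath]
      simp only [List.append_assoc] at hB ⊢
      rw [hB, pvGoBody_eq]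
      simp
    · have hB : pvGoSrc [] (tw ++ ':' :: u) = none := by
        have ha : ∀ x ∈ tw, x ≠ ':' ∧ x ≠ '>' := by
          intro x hx
          exact ⟨fun hc => hnotin (hc ▸ hx), fun hg => hgt (hg ▸ hx)⟩
        rw [pvGoSrc_append [] tw (':' :: u) ha]
        simp [pvGoSrc]
      rw [hB, pvFind_single_not_mem tw '>' hgt]
      simp
  · rw [pvFind_single_not_mem l ':' hcolon, pvGoSrc_none [] l hcolon]
    simp
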